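-- pv_equiv track=rewrite | github.com/harrisonkimca/kakao_practice_tests | kakao_2020_3_round_1.py | generate_lock
-- ===== SOURCE A (Python) =====
-- def generate_lock(key, lock):
--   m = len(key)
--   n = len(lock)
--   tmp = [[0] * (2 * m - 2 + n) for _ in range(2 * m - 2 + n)]
--   for y in range(m - 1, m + n - 1):
--     for x in range(m - 1, m + n - 1):
--       tmp[y][x] = lock[y - (m - 1)][x - (m - 1)]
--   return tmp
-- ===== SOURCE B (Python) =====
-- def generate_lock(key, lock):
--   grid = [list(row) for row in lock]
--   for _ in range(len(key) - 1):
--     grid = ([[0] * (len(grid) + 2)]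
--             + [[0] + row + [0] for row in grid]
--             + [[0] * (len(grid) + 2)])
--   return grid
-- ===== Notes on version B (the rewrite author's own statement) =====
-- stated objective: alternative
-- what changed: B never computes padded indices or a pre-sized grid: it grows the answer structurally, wrapping the lock in a ring of zeros (one zero row above and below, one zero on each side of every row) len(key)-1 times, whereas A allocates the full zero grid and overwrites its centre cells with a nested index loop.
-- outside the precondition, e.g. on generate_lock([[0]], [[1, 2]]): A returns [[1]], B returns [[1, 2]]; on generate_lock([], [[1]]): A raises IndexError, B returns [[1]]
import Mathlib
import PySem

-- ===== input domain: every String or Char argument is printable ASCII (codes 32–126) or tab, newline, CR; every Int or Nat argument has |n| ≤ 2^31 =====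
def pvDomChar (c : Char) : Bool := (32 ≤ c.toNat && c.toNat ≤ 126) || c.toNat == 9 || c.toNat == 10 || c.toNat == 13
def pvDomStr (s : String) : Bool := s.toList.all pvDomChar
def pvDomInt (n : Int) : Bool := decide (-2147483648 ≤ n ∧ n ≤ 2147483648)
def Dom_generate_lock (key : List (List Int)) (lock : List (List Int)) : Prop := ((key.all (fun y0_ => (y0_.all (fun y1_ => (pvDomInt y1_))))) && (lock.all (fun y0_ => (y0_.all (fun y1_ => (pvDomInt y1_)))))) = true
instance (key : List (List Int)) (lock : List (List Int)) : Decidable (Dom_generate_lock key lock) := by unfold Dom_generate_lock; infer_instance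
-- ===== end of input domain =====

-- B grows the padded grid structurally, wrapping the lock in a ring of zeros
-- len(key)-1 times, instead of A's preallocate-then-overwrite nested index loop
-- (objective: alternative).


-- ===== PORT A =====
def generate_lock (key : List (List Int)) (lock : List (List Int)) : List (List Int) :=
  let m : Int := key.length
  let n : Int := lock.length
  let tmp : List (List Int) :=
    (PySem.List.pyRange 0 (2*m - 2 + n) 1).map (fun _ =>
      (PySem.List.pyRange 0 (2*m - 2 + n) 1).map (fun _ => (0 : Int)))
  (PySem.List.pyRange (m - 1) (m + n - 1) 1).foldl (fun tmp y =>
    (PySem.List.pyRange (m - 1) (m + n - 1) 1).foldl (fun tmp x =>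
      PySem.List.pySetD tmp y
        (PySem.List.pySetD (PySem.List.pyGetD tmp y []) x
          (PySem.List.pyGetD (PySem.List.pyGetD lock (y - (m - 1)) []) (x - (m - 1)) 0))) tmp) tmp

-- ===== PORT B =====
def generate_lock_alt (key : List (List Int)) (lock : List (List Int)) : List (List Int) :=
  let grid : List (List Int) := lock.map (fun row => row)
  (PySem.List.pyRange 0 ((key.length : Int) - 1) 1).foldl (fun grid _ =>
    [List.replicate (grid.length + 2) (0 : Int)]
      ++ grid.map (fun row => [0] ++ row ++ [0])
      ++ [List.replicate (grid.length + 2) (0 : Int)]) grid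

-- ===== PRECONDITION & SPEC =====
-- Pre_ excludes non-square lock grids (on a short row A raises IndexError; on an over-long
-- row A's cell-by-cell copy silently reads only the first n entries, an unspecified corner)
-- and an empty key with a nonempty lock (A raises IndexError).
def Pre_generate_lock (key : List (List Int)) (lock : List (List Int)) : Prop :=
  (key ≠ [] ∨ lock = []) ∧ ∀ row ∈ lock, row.length = lock.length
instance (key : List (List Int)) (lock : List (List Int)) : Decidable (Pre_generate_lock key lock) := by unfold Pre_generate_lock; infer_instance

def pvWitness_generate_lock : List (List Int) × List (List Int) :=
  ([[1, 0], [0, 1]], [[3, 4], [5, 6]])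

def Spec_generate_lock (key : List (List Int)) (lock : List (List Int)) (out : List (List Int)) : Prop := out = generate_lock_alt key lock
instance (key : List (List Int)) (lock : List (List Int)) (out : List (List Int)) : Decidable (Spec_generate_lock key lock out) := by unfold Spec_generate_lock; infer_instance

-- ===== CLAIM (what is proved, stated in full; the proofs are below) =====
def Claim_equal_generate_lock : Prop := ∀ (key : List (List Int)) (lock : List (List Int)), Dom_generate_lock key lock → Pre_generate_lock key lock → Spec_generate_lock key lock (generate_lock key lock)

-- ===== LEMMAS AND PROOFS =====

-- Folding pySetD writes (value depends only on the index) over any list of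
-- nonnegative indices, read back pointwise.
theorem foldl_pySetD_getElem {α : Type} (zs : List Int) (f : Int → α) (acc : List α)
    (hz : ∀ i ∈ zs, 0 ≤ i) (j : Nat) (hj : j < acc.length) :
    ((zs.foldl (fun a i => PySem.List.pySetD a i (f i)) acc))[j]? =
      if (j : Int) ∈ zs then some (f j) else acc[j]? := by
  induction zs generalizing acc with
  | nil => simp
  | cons i t ih =>
    simp only [List.foldl_cons]
    have hi : 0 ≤ i := hz i (List.mem_cons_self ..)
    have ht : ∀ x ∈ t, 0 ≤ x := fun x hx => hz x (List.mem_cons_of_mem _ hx)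
    rw [ih _ ht (by rw [PySem.List.length_pySetD]; exact hj)]
    rw [PySem.List.pySetD_of_nonneg (h := hi)]
    by_cases hjt : (j : Int) ∈ t
    · simp [hjt]
    · simp only [hjt, if_false, List.mem_cons]
      rw [List.getElem?_set]
      by_cases hij : i = (j : Int)
      · simp [hij, hj]
      · have h1 : i.toNat ≠ j := by omega
        have h2 : ¬((j : Int) = i) := fun h => hij h.symm
        simp [h1, h2]

-- pyGetD with a nonnegative index, as a plain getElem?/getD.
theorem pv_pyGetD_nonneg {α : Type} (xs : List α) {i : Int} (d : α) (h : 0 ≤ i) :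
    PySem.List.pyGetD xs i d = (xs[i.toNat]?).getD d := by
  simp [PySem.List.pyGetD, PySem.List.pyGet?_of_nonneg xs h]

-- Folding per-cell writes into a row preserves its length.
theorem pv_foldl_set_length_row {α : Type} (zs : List Int) (v : Int → α) (r : List α) :
    (zs.foldl (fun row x => PySem.List.pySetD row x (v x)) r).length = r.length := by
  induction zs generalizing r with
  | nil => rfl
  | cons i t ih => simp [List.foldl_cons, ih, PySem.List.length_pySetD]

-- Folding whole-row rewrites into a grid preserves its length.
theorem pv_foldl_rowModify_length {β : Type} (zs : List Int) (F : Int → β → β) (d : β)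
    (acc : List β) :
    (zs.foldl (fun a y => PySem.List.pySetD a y (F y (PySem.List.pyGetD a y d))) acc).length
      = acc.length := by
  induction zs generalizing acc with
  | nil => rfl
  | cons i t ih => simp [List.foldl_cons, ih, PySem.List.length_pySetD]

-- A's inner loop repeatedly rewrites the SAME row y: it equals one write of the
-- row obtained by folding the cell writes over the row's current value.
theorem pv_inner_commute {γ : Type} (xs : List Int) (y : Int) (hy : 0 ≤ y) (v : Int → γ)
    (a : List (List γ)) :
    xs.foldl (fun t x => PySem.List.pySetD t y
        (PySem.List.pySetD (PySem.List.pyGetD t y []) x (v x))) a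
      = PySem.List.pySetD a y
          (xs.foldl (fun row x => PySem.List.pySetD row x (v x)) (PySem.List.pyGetD a y [])) := by
  induction xs generalizing a with
  | nil =>
    simp only [List.foldl_nil]
    rw [PySem.List.pySetD_of_nonneg (h := hy), pv_pyGetD_nonneg _ _ hy]
    by_cases hlt : y.toNat < a.length
    · rw [List.getElem?_eq_getElem hlt]
      simp only [Option.getD_some]
      exact (List.set_getElem_self hlt).symm
    · rw [List.set_eq_of_length_le (by omega)]
  | cons x t ih =>
    simp only [List.foldl_cons]
    rw [ih]
    by_cases hlt : y.toNat < a.length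
    · have hget : PySem.List.pyGetD (PySem.List.pySetD a y
          (PySem.List.pySetD (PySem.List.pyGetD a y []) x (v x))) y []
          = PySem.List.pySetD (PySem.List.pyGetD a y []) x (v x) := by
        rw [PySem.List.pySetD_of_nonneg (h := hy), pv_pyGetD_nonneg _ _ hy]
        simp [hlt]
      rw [hget, PySem.List.pySetD_of_nonneg (h := hy), PySem.List.pySetD_of_nonneg (h := hy),
          PySem.List.pySetD_of_nonneg (h := hy), List.set_set]
    · have hnoop : ∀ (r : List γ), PySem.List.pySetD a y r = a := by
        intro r
        rw [PySem.List.pySetD_of_nonneg (h := hy), List.set_eq_of_length_le (by omega)]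
      have hget0 : PySem.List.pyGetD a y ([] : List γ) = [] := by
        rw [pv_pyGetD_nonneg _ _ hy, List.getElem?_eq_none (by omega)]
        rfl
      have hnil : PySem.List.pySetD ([] : List γ) x (v x) = [] := by
        simp [PySem.List.pySetD, PySem.List.pySet?]
        cases PySem.List.pyIdx? 0 x <;> rfl
      simp only [hnoop, hget0, hnil]

-- A's outer loop writes each row at most once (Nodup): read the result pointwise.
theorem pv_foldl_rowModify_getElem {β : Type} (zs : List Int) (F : Int → β → β) (d : β)
    (acc : List β) (hz : ∀ i ∈ zs, 0 ≤ i) (hnd : zs.Nodup) (j : Nat) (hj : j < acc.length) :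
    (zs.foldl (fun a y => PySem.List.pySetD a y (F y (PySem.List.pyGetD a y d))) acc)[j]?
      = if (j : Int) ∈ zs then (acc[j]?).map (F (j : Int)) else acc[j]? := by
  induction zs generalizing acc with
  | nil => simp
  | cons i t ih =>
    simp only [List.foldl_cons]
    have hi : 0 ≤ i := hz i (List.mem_cons_self ..)
    have ht : ∀ x ∈ t, 0 ≤ x := fun x hx => hz x (List.mem_cons_of_mem _ hx)
    have hnt : t.Nodup := hnd.of_cons
    have hit : i ∉ t := (List.nodup_cons.mp hnd).1
    rw [ih _ ht hnt (by rw [PySem.List.length_pySetD]; exact hj)]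
    rw [PySem.List.pySetD_of_nonneg (h := hi)]
    by_cases hjt : (j : Int) ∈ t
    · have hij : ¬(i = (j : Int)) := fun h => hit (h ▸ hjt)
      have h1 : i.toNat ≠ j := by omega
      rw [List.getElem?_set]
      simp [hjt, h1]
    · simp only [hjt, if_false, List.mem_cons]
      rw [List.getElem?_set]
      by_cases hij : i = (j : Int)
      · have : i.toNat = j := by omega
        rw [pv_pyGetD_nonneg _ _ hi, List.getElem?_eq_getElem hj, hij]
        simp [hj]
      · have h1 : i.toNat ≠ j := by omega
        have h2 : ¬((j : Int) = i) := fun h => hij h.symm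
        simp [h1, h2]

-- The heart of A's side: its fill-the-centre double loop over any square lock,
-- with the padding width abstracted, equals a padded row comprehension.
theorem pv_grid (lock : List (List Int)) (pad : Int) (hpad : 0 ≤ pad)
    (hsq : ∀ row ∈ lock, row.length = lock.length) :
    List.foldl (fun tmp y => List.foldl (fun tmp x =>
        PySem.List.pySetD tmp y
          (PySem.List.pySetD (PySem.List.pyGetD tmp y []) x
            (PySem.List.pyGetD (PySem.List.pyGetD lock (y - pad) []) (x - pad) 0)))
        tmp (PySem.List.pyRange pad (pad + lock.length)))
      (List.map (fun _ => List.map (fun _ => (0 : Int)) (PySem.List.pyRange 0 (2 * pad + lock.length)))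
        (PySem.List.pyRange 0 (2 * pad + lock.length)))
      (PySem.List.pyRange pad (pad + lock.length))
    = List.map (fun r =>
        if pad ≤ r ∧ r < pad + lock.length then
          List.replicate pad.toNat 0 ++ PySem.List.pyGetD lock (r - pad) [] ++
            List.replicate pad.toNat 0
        else List.replicate (2 * pad + lock.length).toNat 0)
      (PySem.List.pyRange 0 (2 * pad + lock.length)) := by
  have hN0 : (0 : Int) ≤ (lock.length : Int) := Int.natCast_nonneg _
  have hS0 : (0 : Int) ≤ 2 * pad + lock.length := by omega
  have hzlen : (List.map (fun _ => (0 : Int)) (PySem.List.pyRange 0 (2 * pad + lock.length))).length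
      = (2 * pad + (lock.length : Int)).toNat := by
    simp [PySem.List.length_pyRange_one]
  have hrow : ∀ y : Int, pad ≤ y → y < pad + lock.length →
      List.foldl (fun row x =>
          PySem.List.pySetD row x
            (PySem.List.pyGetD (PySem.List.pyGetD lock (y - pad) []) (x - pad) 0))
        (List.map (fun _ => (0 : Int)) (PySem.List.pyRange 0 (2 * pad + lock.length)))
        (PySem.List.pyRange pad (pad + lock.length))
      = List.replicate pad.toNat 0 ++ PySem.List.pyGetD lock (y - pad) [] ++
          List.replicate pad.toNat 0 := by
    intro y hy1 hy2
    have hinr : PySem.Raise.InRange lock.length (y - pad) := ⟨by omega, by omega⟩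
    have hlr : (PySem.List.pyGetD lock (y - pad) []).length = lock.length :=
      hsq _ (PySem.List.pyGetD_mem lock [] hinr)
    apply List.ext_getElem?
    intro k
    by_cases hkS : k < (2 * pad + (lock.length : Int)).toNat
    · rw [foldl_pySetD_getElem _ _ _
        (fun x hx => by have := (PySem.List.mem_pyRange_one.mp hx).1; omega) k
        (by rw [hzlen]; exact hkS)]
      have hzk : (List.map (fun _ => (0 : Int)) (PySem.List.pyRange 0 (2 * pad + lock.length)))[k]?
          = some 0 := by
        rw [List.getElem?_eq_getElem (by rw [hzlen]; exact hkS)]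
        simp
      by_cases hc : pad ≤ (k : Int) ∧ (k : Int) < pad + lock.length
      · have hmem : (k : Int) ∈ PySem.List.pyRange pad (pad + lock.length) :=
          PySem.List.mem_pyRange_one.mpr hc
        rw [if_pos hmem]
        have hkl : k < (List.replicate pad.toNat (0 : Int) ++ PySem.List.pyGetD lock (y - pad) []).length := by
          simp [hlr]; omega
        rw [List.getElem?_append_left hkl,
            List.getElem?_append_right (by simp; omega : (List.replicate pad.toNat (0 : Int)).length ≤ k)]
        rw [PySem.List.pyGetD_eq_getElem _ 0 (by omega) (by rw [hlr]; omega)]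
        rw [List.getElem?_eq_getElem (by simp [hlr]; omega)]
        have hidx : ((k : Int) - pad).toNat = k - (List.replicate pad.toNat (0 : Int)).length := by
          simp; omega
        simp only [hidx]
      · have hmem : (k : Int) ∉ PySem.List.pyRange pad (pad + lock.length) := by
          rw [PySem.List.mem_pyRange_one]; exact hc
        rw [if_neg hmem, hzk]
        by_cases hkp : k < pad.toNat
        · rw [List.getElem?_append_left (by simp [hlr]; omega),
              List.getElem?_append_left (by simp; omega)]
          rw [List.getElem?_replicate, if_pos hkp]
        · rw [List.getElem?_append_right (by simp [hlr]; omega)]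
          rw [List.getElem?_replicate, if_pos (by simp [hlr]; omega)]
    · rw [List.getElem?_eq_none, List.getElem?_eq_none]
      · simp [hlr]; omega
      · rw [pv_foldl_set_length_row, hzlen]; omega
  -- rewrite A's inner loop as a single row write, then read both sides pointwise
  rw [PySem.List.foldl_congr_mem (PySem.List.pyRange pad (pad + lock.length)) _
    (fun a y => PySem.List.pySetD a y
      (List.foldl (fun row x =>
          PySem.List.pySetD row x
            (PySem.List.pyGetD (PySem.List.pyGetD lock (y - pad) []) (x - pad) 0))
        (PySem.List.pyGetD a y []) (PySem.List.pyRange pad (pad + lock.length)))) _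
    (fun acc y hy => pv_inner_commute _ y
      (by have := (PySem.List.mem_pyRange_one.mp hy).1; omega) _ acc)]
  apply List.ext_getElem?
  intro j
  by_cases hjS : j < (2 * pad + (lock.length : Int)).toNat
  · have hlen0 : j < (List.map (fun _ => List.map (fun _ => (0 : Int))
        (PySem.List.pyRange 0 (2 * pad + lock.length)))
        (PySem.List.pyRange 0 (2 * pad + lock.length))).length := by
      simp [PySem.List.length_pyRange_one]; omega
    rw [pv_foldl_rowModify_getElem _
      (fun y r => List.foldl (fun row x =>
          PySem.List.pySetD row x
            (PySem.List.pyGetD (PySem.List.pyGetD lock (y - pad) []) (x - pad) 0))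
        r (PySem.List.pyRange pad (pad + lock.length))) ([] : List Int) _
      (fun i hi => by have := (PySem.List.mem_pyRange_one.mp hi).1; omega)
      (PySem.List.nodup_pyRange_one _ _) j hlen0]
    have htmp0 : (List.map (fun _ => List.map (fun _ => (0 : Int))
        (PySem.List.pyRange 0 (2 * pad + lock.length)))
        (PySem.List.pyRange 0 (2 * pad + lock.length)))[j]?
        = some (List.map (fun _ => (0 : Int)) (PySem.List.pyRange 0 (2 * pad + lock.length))) := by
      rw [List.getElem?_eq_getElem hlen0]
      simp
    have hrhs : (List.map (fun r =>
        if pad ≤ r ∧ r < pad + lock.length then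
          List.replicate pad.toNat 0 ++ PySem.List.pyGetD lock (r - pad) [] ++
            List.replicate pad.toNat 0
        else List.replicate (2 * pad + lock.length).toNat 0)
        (PySem.List.pyRange 0 (2 * pad + lock.length)))[j]?
        = some (if pad ≤ (j : Int) ∧ (j : Int) < pad + lock.length then
            List.replicate pad.toNat 0 ++ PySem.List.pyGetD lock ((j : Int) - pad) [] ++
              List.replicate pad.toNat 0
          else List.replicate (2 * pad + lock.length).toNat 0) := by
      rw [List.getElem?_eq_getElem (by simp [PySem.List.length_pyRange_one]; omega)]
      simp only [List.getElem_map, PySem.List.getElem_pyRange_one, zero_add]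
    rw [htmp0, hrhs]
    by_cases hc : pad ≤ (j : Int) ∧ (j : Int) < pad + lock.length
    · have hmem : (j : Int) ∈ PySem.List.pyRange pad (pad + lock.length) :=
        PySem.List.mem_pyRange_one.mpr hc
      rw [if_pos hmem, if_pos hc, Option.map_some]
      exact congrArg some (hrow (j : Int) hc.1 hc.2)
    · have hmem : (j : Int) ∉ PySem.List.pyRange pad (pad + lock.length) := by
        rw [PySem.List.mem_pyRange_one]; exact hc
      rw [if_neg hmem, if_neg hc]
      rw [List.map_const', PySem.List.length_pyRange_one, sub_zero]
  · rw [List.getElem?_eq_none, List.getElem?_eq_none]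
    · simp [PySem.List.length_pyRange_one]; omega
    · rw [pv_foldl_rowModify_length _ (fun y r => List.foldl (fun row x =>
          PySem.List.pySetD row x
            (PySem.List.pyGetD (PySem.List.pyGetD lock (y - pad) []) (x - pad) 0))
        r (PySem.List.pyRange pad (pad + lock.length))) ([] : List Int)]
      simp [PySem.List.length_pyRange_one]; omega

-- The common normal form: the lock padded by p zeros on every side, row by row.
def pvPadForm (p : Nat) (lock : List (List Int)) : List (List Int) :=
  (List.range (2*p + lock.length)).map (fun r =>
    if p ≤ r ∧ r < p + lock.length then
      List.replicate p 0 ++ ((lock[r - p]?).getD []) ++ List.replicate p 0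
    else List.replicate (2*p + lock.length) 0)

-- One ring of zeros around a grid (the body of B's loop).
def pvWrap (grid : List (List Int)) : List (List Int) :=
  [List.replicate (grid.length + 2) (0 : Int)]
    ++ grid.map (fun row => [0] ++ row ++ [0])
    ++ [List.replicate (grid.length + 2) (0 : Int)]

-- A's row comprehension (Int-indexed) is the Nat-indexed normal form.
theorem pv_rowForm_eq_padForm (pad : Int) (hpad : 0 ≤ pad) (lock : List (List Int)) :
    List.map (fun r =>
        if pad ≤ r ∧ r < pad + lock.length then
          List.replicate pad.toNat 0 ++ PySem.List.pyGetD lock (r - pad) [] ++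
            List.replicate pad.toNat 0
        else List.replicate (2 * pad + lock.length).toNat 0)
      (PySem.List.pyRange 0 (2 * pad + lock.length))
    = pvPadForm pad.toNat lock := by
  apply List.ext_getElem?
  intro j
  by_cases hj : j < 2 * pad.toNat + lock.length
  · rw [List.getElem?_eq_getElem (by simp [PySem.List.length_pyRange_one]; omega),
        List.getElem?_eq_getElem (by simp [pvPadForm]; omega)]
    simp only [List.getElem_map, PySem.List.getElem_pyRange_one, zero_add, pvPadForm,
      List.getElem_range]
    apply congrArg some
    by_cases hc : pad.toNat ≤ j ∧ j < pad.toNat + lock.length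
    · rw [if_pos (by constructor <;> omega), if_pos hc,
        pv_pyGetD_nonneg _ _ (by omega : (0:Int) ≤ (j : Int) - pad)]
      have : ((j : Int) - pad).toNat = j - pad.toNat := by omega
      rw [this]
    · rw [if_neg (by omega), if_neg hc]
      have : (2 * pad + (lock.length : Int)).toNat = 2 * pad.toNat + lock.length := by omega
      rw [this]
  · rw [List.getElem?_eq_none (by simp [PySem.List.length_pyRange_one]; omega),
        List.getElem?_eq_none (by simp [pvPadForm]; omega)]

-- Padding by zero is the identity.
theorem pv_padForm_zero (lock : List (List Int)) : pvPadForm 0 lock = lock := by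
  unfold pvPadForm
  apply List.ext_getElem (by simp)
  intro i h1 h2
  simp [h2]

-- Wrapping a p-padded grid gives the (p+1)-padded grid.
theorem pv_wrap_padForm (p : Nat) (lock : List (List Int)) :
    pvWrap (pvPadForm p lock) = pvPadForm (p+1) lock := by
  have hrepl : ∀ q : Nat, List.replicate q (0:Int) ++ [0] = 0 :: List.replicate q 0 := by
    intro q; rw [← List.replicate_succ', List.replicate_succ]
  have hS : 2*(p+1) + lock.length = (2*p + lock.length) + 1 + 1 := by omega
  unfold pvWrap pvPadForm
  rw [List.length_map, List.length_range, List.map_map, hS, List.range_succ,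
      List.range_succ_eq_map, List.map_append, List.map_cons, List.map_map]
  have hmid : ∀ r ∈ List.range (2*p + lock.length),
      ((fun row => [(0:Int)] ++ row ++ [0]) ∘ fun r =>
        if p ≤ r ∧ r < p + lock.length then
          List.replicate p (0:Int) ++ ((lock[r - p]?).getD []) ++ List.replicate p 0
        else List.replicate (2*p + lock.length) 0) r
      = ((fun r =>
        if p + 1 ≤ r ∧ r < p + 1 + lock.length then
          List.replicate (p+1) (0:Int) ++ ((lock[r - (p+1)]?).getD []) ++ List.replicate (p+1) 0
        else List.replicate (2*(p+1) + lock.length) 0) ∘ Nat.succ) r := by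
    intro r hr
    have hrS : r < 2*p + lock.length := List.mem_range.mp hr
    simp only [Function.comp_apply]
    by_cases hc : p ≤ r ∧ r < p + lock.length
    · rw [if_pos hc, if_pos (by omega)]
      have hidx : Nat.succ r - (p+1) = r - p := by omega
      rw [hidx, List.replicate_succ]
      simp only [List.append_assoc, List.cons_append]
      rw [hrepl]
      simp
    · rw [if_neg hc, if_neg (by omega)]
      rw [show (2*(p+1) + lock.length) = ((2*p + lock.length) + 1) + 1 from by omega]
      rw [List.replicate_succ, List.replicate_succ']
      simp
  rw [List.map_congr_left hmid]
  have e : 2*(p+1) + lock.length = 2*p + lock.length + 2 := by omega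
  simp only [e, show 2*p+lock.length+1+1 = 2*p+lock.length+2 from by omega]
  simp only [List.map_cons, List.map_nil]
  rw [if_neg (by omega)]
  simp
  intro _ h
  omega

-- A foldl whose body ignores the list element is function iteration.
theorem pv_foldl_const {α β : Type} (f : α → α) (l : List β) (a : α) :
    l.foldl (fun g _ => f g) a = f^[l.length] a := by
  induction l generalizing a with
  | nil => rfl
  | cons x t ih => simp [List.foldl_cons, ih, Function.iterate_succ_apply]

-- Iterated wrapping from the bare lock reaches every padded form.
theorem pv_iter_padForm (p : Nat) (lock : List (List Int)) :
    pvWrap^[p] lock = pvPadForm p lock := by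
  induction p with
  | zero => simp [pv_padForm_zero]
  | succ k ih => rw [Function.iterate_succ_apply', ih, pv_wrap_padForm]

-- B's padded grid for any lock, as the normal form.
theorem pv_alt_eq_padForm (key lock : List (List Int)) :
    generate_lock_alt key lock = pvPadForm ((key.length : Int) - 1).toNat lock := by
  simp only [generate_lock_alt]
  rw [List.map_id']
  have hbody : (fun (grid : List (List Int)) (_ : Int) =>
      [List.replicate (grid.length + 2) (0 : Int)]
        ++ grid.map (fun row => [0] ++ row ++ [0])
        ++ [List.replicate (grid.length + 2) (0 : Int)]) = fun g _ => pvWrap g := rfl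
  rw [hbody, pv_foldl_const pvWrap, PySem.List.length_pyRange_one, sub_zero,
      pv_iter_padForm]

-- A's padded grid for a nonempty key and a square lock, as the normal form.
theorem pv_main (key lock : List (List Int)) (hk : key ≠ [])
    (hsq : ∀ row ∈ lock, row.length = lock.length) :
    generate_lock key lock = pvPadForm ((key.length : Int) - 1).toNat lock := by
  have hM : (1 : Int) ≤ (key.length : Int) := by
    exact_mod_cast List.length_pos_of_ne_nil hk
  have hN0 : (0 : Int) ≤ (lock.length : Int) := Int.natCast_nonneg _
  simp only [generate_lock]
  have e1 : (key.length : Int) + lock.length - 1 = ((key.length : Int) - 1) + lock.length := by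
    ring
  have e2 : 2 * (key.length : Int) - 2 + lock.length
      = 2 * ((key.length : Int) - 1) + lock.length := by ring
  rw [e1, e2, pv_grid lock ((key.length : Int) - 1) (by omega) hsq]
  exact pv_rowForm_eq_padForm _ (by omega) lock

-- ===== VERDICT (by name: the statement is the Claim_ definition above) =====
theorem generate_lock_spec : Claim_equal_generate_lock := by
  intro key lock hdom hpre
  unfold Spec_generate_lock
  obtain ⟨hke, hsq⟩ := hpre
  by_cases hk : key = []
  · have hlock : lock = [] := by
      rcases hke with h | h
      · exact absurd hk h
      · exact h
    subst hk; subst hlock; decide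
  · rw [pv_main key lock hk hsq, pv_alt_eq_padForm]
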